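-- pv_equiv track=rewrite | github.com/L273/Cryptology- | 基于密码算法的服务器/大作业项目文件/备份/Server.py | de_RAS
-- ===== SOURCE A (Python) =====
-- def de_RAS(m):
--     k=[23, 187]
--     c=""
--     for i in m:
--         i=ord(i)
--         i=(i**k[0])%k[1]
--         c = c+chr(i)
--
--     return c
-- ===== SOURCE B (Python) =====
-- def de_RAS(m):
--     # invert the loop: group positions by character, transform each distinct
--     # character once (modular exponentiation), then fill an output buffer.
--     positions = {}
--     for idx, ch in enumerate(m):
--         positions.setdefault(ch, []).append(idx)
--     out = ["\0"] * len(m)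
--     for ch, idxs in positions.items():
--         t = chr(pow(ord(ch), 23, 187))
--         for idx in idxs:
--             out[idx] = t
--     return "".join(out)
-- ===== Notes on version B (the rewrite author's own statement) =====
-- stated objective: faster
-- what changed: Inverts the loop structure: builds an inverted index mapping each distinct character to its list of positions, computes the RSA transform once per distinct character via three-argument modular pow, and fills a preallocated output buffer by position, instead of A's per-occurrence big-int exponentiation with string concatenation.
import Mathlib
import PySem

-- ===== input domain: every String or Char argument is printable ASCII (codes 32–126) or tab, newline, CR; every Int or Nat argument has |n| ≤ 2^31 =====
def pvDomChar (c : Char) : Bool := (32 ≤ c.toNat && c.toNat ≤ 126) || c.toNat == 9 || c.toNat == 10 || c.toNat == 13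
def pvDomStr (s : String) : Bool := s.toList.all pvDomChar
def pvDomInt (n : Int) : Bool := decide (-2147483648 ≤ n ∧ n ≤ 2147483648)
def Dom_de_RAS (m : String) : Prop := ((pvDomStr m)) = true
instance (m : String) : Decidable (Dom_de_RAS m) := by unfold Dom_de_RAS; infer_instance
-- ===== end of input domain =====

-- B inverts the loop: it groups positions by character, transforms each distinct character
-- once (modular pow), and fills a preallocated output buffer by position (objective: faster).

-- ===== PORT A =====
-- per-character loop: i = ord(i); i = (i**23) % 187; c = c + chr(i)   (accumulator kept as List Char)
def de_RAS (m : String) : String :=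
  String.ofList (m.toList.foldl (fun c i =>
    let i : Int := (i.toNat : Int)
    let i := PySem.Int.mod (i ^ 23) 187
    c ++ [Char.ofNat i.toNat]) [])

-- ===== PORT B =====
-- positions.setdefault(ch, []).append(idx)  over enumerate(m): d[ch] = d.get(ch, []) ++ [idx]
def de_RAS_positions (m : String) : PySem.Dict Char (List Int) :=
  (PySem.List.enumerate m.toList).foldl
    (fun d p => d.modify p.2 [] (fun l => l ++ [p.1])) PySem.Dict.empty

-- t = chr(pow(ord(ch), 23, 187))
def de_RAS_tch (ch : Char) : Char :=
  Char.ofNat (PySem.Int.powMod ((ch.toNat : Int)) 23 187).toNat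

-- out = ["\0"]*len(m); for ch, idxs in positions.items(): for idx in idxs: out[idx] = t; "".join(out)
def de_RAS_alt (m : String) : String :=
  let positions := de_RAS_positions m
  let out0 : List Char := List.replicate m.toList.length (Char.ofNat 0)
  let out := positions.items.foldl (fun out p =>
    let t := de_RAS_tch p.1
    p.2.foldl (fun out idx => PySem.List.pySetD out idx t) out) out0
  String.ofList out

-- ===== PRECONDITION & SPEC =====
def Spec_de_RAS (m : String) (out : String) : Prop := out = de_RAS_alt m
instance (m : String) (out : String) : Decidable (Spec_de_RAS m out) := by unfold Spec_de_RAS; infer_instance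

-- ===== CLAIM (what is proved, stated in full; the proofs are below) =====
def Claim_equal_de_RAS : Prop := ∀ (m : String), Dom_de_RAS m → Spec_de_RAS m (de_RAS m)

-- ===== LEMMAS AND PROOFS =====

-- the common per-character transform
def pvTrans (ch : Char) : Char :=
  Char.ofNat (PySem.Int.mod ((ch.toNat : Int) ^ 23) 187).toNat

theorem tch_eq_pvTrans (ch : Char) : de_RAS_tch ch = pvTrans ch := by
  unfold de_RAS_tch pvTrans
  rw [PySem.Int.powMod_eq]

theorem de_RAS_eq_map (m : String) : de_RAS m = String.ofList (m.toList.map pvTrans) := by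
  show String.ofList (m.toList.foldl (fun c i => c ++ [pvTrans i]) []) = _
  rw [PySem.List.foldl_append_singleton_eq_map]
  simp

-- the write sequence of B's fill loops, flattened to (index, char) pairs
def wfold (W : List (Int × Char)) (out : List Char) : List Char :=
  W.foldl (fun out p => PySem.List.pySetD out p.1 p.2) out

theorem wfold_length (W : List (Int × Char)) (out : List Char) :
    (wfold W out).length = out.length := by
  induction W generalizing out with
  | nil => rfl
  | cons p W ih => simp [wfold, List.foldl_cons] at ih ⊢; rw [ih, PySem.List.length_pySetD]

theorem wfold_getElem?_not_mem (W : List (Int × Char)) (out : List Char) (k : Nat)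
    (h : ∀ p ∈ W, 0 ≤ p.1 ∧ p.1 ≠ (k : Int)) :
    (wfold W out)[k]? = out[k]? := by
  induction W generalizing out with
  | nil => rfl
  | cons p W ih =>
    have hp := h p (List.mem_cons_self ..)
    have hW : ∀ q ∈ W, 0 ≤ q.1 ∧ q.1 ≠ (k : Int) := fun q hq => h q (List.mem_cons_of_mem _ hq)
    show (wfold W (PySem.List.pySetD out p.1 p.2))[k]? = out[k]?
    rw [ih _ hW, PySem.List.pySetD_of_nonneg _ _ hp.1, List.getElem?_set_ne]
    intro hkk
    exact hp.2 (by omega)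

theorem wfold_getElem?_mem (W : List (Int × Char)) (out : List Char) (k : Nat) (c : Char)
    (hk : k < out.length)
    (hmem : ((k : Int), c) ∈ W)
    (hpos : ∀ p ∈ W, 0 ≤ p.1)
    (huniq : ∀ p ∈ W, p.1 = (k : Int) → p.2 = c) :
    (wfold W out)[k]? = some c := by
  induction W generalizing out with
  | nil => cases hmem
  | cons p W ih =>
    show (wfold W (PySem.List.pySetD out p.1 p.2))[k]? = some c
    by_cases h : (k : Int) ∈ W.map Prod.fst
    · -- a later write at k exists; all writes at k write c, so recurse
      obtain ⟨q, hq, hq1⟩ := List.mem_map.mp h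
      have hq2 : q.2 = c := huniq q (List.mem_cons_of_mem _ hq) hq1
      have hqc : ((k : Int), c) ∈ W := by
        have : q = ((k : Int), c) := Prod.ext hq1 hq2
        rwa [this] at hq
      refine ih _ ?_ hqc (fun r hr => hpos r (List.mem_cons_of_mem _ hr))
        (fun r hr => huniq r (List.mem_cons_of_mem _ hr))
      rw [PySem.List.pySetD_of_nonneg _ _ (hpos p (List.mem_cons_self ..)), List.length_set]
      exact hk
    · -- no later write at k: the head must be the write at k, and it survives
      have hp : p = ((k : Int), c) := by
        rcases List.mem_cons.mp hmem with h1 | h1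
        · exact h1.symm
        · exact absurd (List.mem_map.mpr ⟨_, h1, rfl⟩) h
      have hW : ∀ q ∈ W, 0 ≤ q.1 ∧ q.1 ≠ (k : Int) := by
        intro q hq
        exact ⟨hpos q (List.mem_cons_of_mem _ hq), fun hc => h (List.mem_map.mpr ⟨q, hq, hc⟩)⟩
      rw [hp, wfold_getElem?_not_mem W _ k hW,
        PySem.List.pySetD_of_nonneg _ _ (Int.natCast_nonneg k)]
      simp [hk]

-- characterization of the inverted index: positions[ch] lists exactly the enumerate
-- entries whose character is ch, in order
theorem positions_getD (m : String) (ch : Char) :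
    (de_RAS_positions m).getD ch [] =
      ((PySem.List.enumerate m.toList).filter (fun p => p.2 == ch)).map (fun p => p.1) := by
  have key : de_RAS_positions m =
      ((PySem.List.enumerate m.toList).map Prod.swap).foldl
        (fun d q => d.modify q.1 [] (fun l => l ++ [q.2])) PySem.Dict.empty := by
    unfold de_RAS_positions
    rw [List.foldl_map]
    rfl
  rw [key, PySem.Dict.getD_foldl_modify_append]
  simp [List.filter_map, List.map_map, Function.comp_def]

theorem positions_keys_nodup (m : String) : (de_RAS_positions m).keys.Nodup := by
  unfold de_RAS_positions
  exact PySem.Dict.nodup_keys_foldl_modify_key (β := Int × Char)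
    (PySem.List.enumerate m.toList) (fun p => p.2) [] (fun _ p l => l ++ [p.1])
    PySem.Dict.empty (by simp [PySem.Dict.keys_empty])

theorem mem_positions_keys (m : String) (ch : Char) :
    ch ∈ (de_RAS_positions m).keys ↔ ch ∈ m.toList := by
  unfold de_RAS_positions
  rw [PySem.Dict.keys_foldl_modify_key (β := Int × Char)
    (PySem.List.enumerate m.toList) (fun p => p.2) [] (fun _ p l => l ++ [p.1]) PySem.Dict.empty]
  rw [PySem.Dict.keys_empty, PySem.List.map_snd_enumerate]
  simp [PySem.Set.mem_update]

-- the flattened write list of B's two nested fill loops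
def pvW (m : String) : List (Int × Char) :=
  (de_RAS_positions m).items.flatMap (fun p => p.2.map (fun i => (i, de_RAS_tch p.1)))

theorem de_RAS_alt_eq_wfold (m : String) :
    de_RAS_alt m = String.ofList (wfold (pvW m) (List.replicate m.toList.length (Char.ofNat 0))) := by
  have hfg : (fun (out : List Char) (p : Char × List Int) =>
        List.foldl (fun out q => PySem.List.pySetD out q.1 q.2) out
          (List.map (fun i => (i, de_RAS_tch p.1)) p.2))
      = (fun (out : List Char) (p : Char × List Int) =>
        List.foldl (fun out idx => PySem.List.pySetD out idx (de_RAS_tch p.1)) out p.2) := by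
    funext out p
    rw [List.foldl_map]
  unfold de_RAS_alt pvW wfold
  rw [List.foldl_flatMap, hfg]

theorem mem_pvW (m : String) (q : Int × Char) :
    q ∈ pvW m ↔ ∃ ch, (q.1, ch) ∈ PySem.List.enumerate m.toList ∧ q.2 = de_RAS_tch ch := by
  unfold pvW
  rw [PySem.Dict.items_eq_map_keys _ (positions_keys_nodup m) []]
  constructor
  · intro hq
    simp only [List.mem_flatMap, List.mem_map] at hq
    obtain ⟨p, ⟨ch, hch, rfl⟩, i, hi, rfl⟩ := hq
    rw [positions_getD] at hi
    obtain ⟨r, hr, rfl⟩ := List.mem_map.mp hi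
    have := List.mem_filter.mp hr
    refine ⟨ch, ?_, rfl⟩
    have h2 : r.2 = ch := by simpa using this.2
    simpa [← h2] using this.1
  · rintro ⟨ch, hch, hq2⟩
    simp only [List.mem_flatMap, List.mem_map]
    refine ⟨(ch, (de_RAS_positions m).getD ch []), ⟨ch, ?_, rfl⟩, q.1, ?_, ?_⟩
    · rw [mem_positions_keys]
      have := (PySem.List.mem_enumerate_iff _ _ _).mp hch
      obtain ⟨k, hk, hkq⟩ := this
      have : ch = m.toList[k] := congrArg Prod.snd hkq
      simp [this, List.getElem_mem]
    · rw [positions_getD]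
      exact List.mem_map.mpr ⟨(q.1, ch), List.mem_filter.mpr ⟨hch, by simp⟩, rfl⟩
    · exact Prod.ext rfl hq2.symm

theorem enumerate_mem_char (m : String) (i : Int) (ch : Char)
    (h : (i, ch) ∈ PySem.List.enumerate m.toList) :
    0 ≤ i ∧ ∃ (k : Nat) (hk : k < m.toList.length), i = (k : Int) ∧ ch = m.toList[k] := by
  obtain ⟨k, hk, hkq⟩ := (PySem.List.mem_enumerate_iff _ _ _).mp h
  have h1 : i = 0 + (k : Int) := congrArg Prod.fst hkq
  have h2 : ch = m.toList[k] := congrArg Prod.snd hkq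
  exact ⟨by omega, k, hk, by omega, h2⟩

theorem wfold_pvW_eq_map (m : String) :
    wfold (pvW m) (List.replicate m.toList.length (Char.ofNat 0)) = m.toList.map pvTrans := by
  apply List.ext_getElem?
  intro k
  by_cases hk : k < m.toList.length
  · rw [wfold_getElem?_mem (pvW m) _ k (pvTrans m.toList[k]) (by simpa using hk)]
    · rw [List.getElem?_map, List.getElem?_eq_getElem hk]
      rfl
    · -- the write ((k : Int), pvTrans m[k]) occurs
      rw [mem_pvW]
      refine ⟨m.toList[k], ?_, (tch_eq_pvTrans _).symm⟩
      exact (PySem.List.mem_enumerate_iff _ _ _).mpr ⟨k, hk, by simp⟩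
    · -- every write index is nonnegative
      intro p hp
      obtain ⟨ch, hch, _⟩ := (mem_pvW m p).mp hp
      exact (enumerate_mem_char m p.1 ch hch).1
    · -- every write at index k writes the same character
      intro p hp hp1
      obtain ⟨ch, hch, hp2⟩ := (mem_pvW m p).mp hp
      obtain ⟨_, k', hk', hik, hchk⟩ := enumerate_mem_char m p.1 ch hch
      have : k' = k := by omega
      subst this
      rw [hp2, hchk, tch_eq_pvTrans]
  · have h1 : (wfold (pvW m) (List.replicate m.toList.length (Char.ofNat 0))).length ≤ k := by
      rw [wfold_length]; simpa using Nat.le_of_not_lt hk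
    rw [List.getElem?_eq_none h1, List.getElem?_eq_none (by simpa using Nat.le_of_not_lt hk)]

-- ===== VERDICT (by name: the statement is the Claim_ definition above) =====
theorem de_RAS_spec : Claim_equal_de_RAS := by
  intro m _
  unfold Spec_de_RAS
  rw [de_RAS_eq_map, de_RAS_alt_eq_wfold, wfold_pvW_eq_map]
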